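-- pv_equiv track=rewrite | github.com/BahaaKhaled34/Task-1---Wikipedia-Crawler | utilities.py | valid_page_name
-- ===== SOURCE A (Python) =====
-- def valid_page_name(page):
--     NON_MAINSPACE = ['File:',
--                      'File talk:',
--                      'Wikipedia:',
--                      'Wikipedia talk:',
--                      'Project:',
--                      'Project talk:',
--                      'Portal:',
--                      'Portal talk:',
--                      'Special:',
--                      'Help:',
--                      'Help talk:',
--                      'Template:',
--                      'Template talk:',
--                      'Talk:',
--                      'Category:',
--                      'Category talk:']
--     return all(not page.startswith(non_main) for non_main in NON_MAINSPACE)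
-- ===== SOURCE B (Python) =====
-- NON_MAINSPACE = {'File:',
--                  'File talk:',
--                  'Wikipedia:',
--                  'Wikipedia talk:',
--                  'Project:',
--                  'Project talk:',
--                  'Portal:',
--                  'Portal talk:',
--                  'Special:',
--                  'Help:',
--                  'Help talk:',
--                  'Template:',
--                  'Template talk:',
--                  'Talk:',
--                  'Category:',
--                  'Category talk:'}
--
-- def valid_page_name(page):
--     prefix, sep, _ = page.partition(':')
--     return not sep or (prefix + ':') not in NON_MAINSPACE
-- ===== Notes on version B (the rewrite author's own statement) =====
-- stated objective: idiomatic
-- what changed: Replaces the 16-way startswith scan with a single partition at the first colon followed by one set-membership lookup of the extracted namespace label.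
import Mathlib
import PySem

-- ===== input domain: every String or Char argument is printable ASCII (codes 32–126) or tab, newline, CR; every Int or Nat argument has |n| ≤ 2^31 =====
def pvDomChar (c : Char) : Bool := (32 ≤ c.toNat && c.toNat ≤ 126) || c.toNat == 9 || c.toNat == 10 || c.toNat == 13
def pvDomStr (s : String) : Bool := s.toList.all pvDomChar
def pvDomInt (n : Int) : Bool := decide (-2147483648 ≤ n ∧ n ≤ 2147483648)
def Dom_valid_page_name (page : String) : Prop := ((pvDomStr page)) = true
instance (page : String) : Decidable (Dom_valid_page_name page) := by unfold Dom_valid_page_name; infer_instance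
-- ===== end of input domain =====

-- B replaces A's 16-way startswith scan by one partition at the first colon plus a single set lookup (idiomatic).


-- ===== PORT A =====
def pvNonMainspaceA : List String :=
  ["File:", "File talk:", "Wikipedia:", "Wikipedia talk:", "Project:", "Project talk:",
   "Portal:", "Portal talk:", "Special:", "Help:", "Help talk:", "Template:",
   "Template talk:", "Talk:", "Category:", "Category talk:"]

def valid_page_name (page : String) : Bool :=
  pvNonMainspaceA.all (fun non_main => !(PySem.Str.startswith page non_main))

-- ===== PORT B =====
def pvNonMainspaceB : PySem.Set (List Char) :=
  PySem.Set.ofList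
    ["File:".toList, "File talk:".toList, "Wikipedia:".toList, "Wikipedia talk:".toList,
     "Project:".toList, "Project talk:".toList, "Portal:".toList, "Portal talk:".toList,
     "Special:".toList, "Help:".toList, "Help talk:".toList, "Template:".toList,
     "Template talk:".toList, "Talk:".toList, "Category:".toList, "Category talk:".toList]

-- page.partition(':') ported by hand: prefix = chars before the first ':', sep nonempty iff ':' occurs.
def valid_page_name_alt (page : String) : Bool :=
  let l := page.toList
  let pref := l.takeWhile (fun c => c != ':')
  let sep := l.contains ':'
  !sep || !(PySem.Set.contains pvNonMainspaceB (pref ++ [':']))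

-- ===== PRECONDITION & SPEC =====
def Spec_valid_page_name (page : String) (out : Bool) : Prop := out = valid_page_name_alt page
instance (page : String) (out : Bool) : Decidable (Spec_valid_page_name page out) := by unfold Spec_valid_page_name; infer_instance

-- ===== CLAIM (what is proved, stated in full; the proofs are below) =====
def Claim_equal_valid_page_name : Prop := ∀ (page : String), Dom_valid_page_name page → Spec_valid_page_name page (valid_page_name page)

-- ===== LEMMAS AND PROOFS =====

lemma pv_takeWhile_all (q rest : List Char) (hq : ':' ∉ q) :
    (q ++ ':' :: rest).takeWhile (fun c => c != ':') = q := by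
  induction q with
  | nil => simp
  | cons a as ih =>
      have ha : a ≠ ':' := by intro h; exact hq (by simp [h])
      simp only [List.cons_append, List.takeWhile_cons]
      simp [ha, ih (fun h => hq (by simp [h]))]

lemma pv_dropWhile_colon (l : List Char) (hc : ':' ∈ l) :
    ∃ t, l.dropWhile (fun c => c != ':') = ':' :: t := by
  induction l with
  | nil => cases hc
  | cons a as ih =>
      by_cases ha : a = ':'
      · exact ⟨as, by simp [List.dropWhile, ha]⟩
      · have : ':' ∈ as := by cases hc with
          | head => exact absurd rfl ha
          | tail _ h => exact h
        obtain ⟨t, ht⟩ := ih this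
        have hb : (a != ':') = true := by simp [ha]
        exact ⟨t, by simp [List.dropWhile, hb, ht]⟩

lemma pv_sw_eq (l q : List Char) (hq : ':' ∉ q) (hc : ':' ∈ l) :
    PySem.Chars.startswith l (q ++ [':']) = (l.takeWhile (fun c => c != ':') == q) := by
  rw [Bool.eq_iff_iff, PySem.Chars.startswith_iff, beq_iff_eq]
  constructor
  · rintro ⟨t, ht⟩
    subst ht
    simpa using pv_takeWhile_all q t hq
  · intro h
    obtain ⟨t, ht⟩ := pv_dropWhile_colon l hc
    refine ⟨t, ?_⟩
    have := List.takeWhile_append_dropWhile (p := fun c => c != ':') (l := l)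
    rw [h] at this
    rw [ht] at this
    simpa using this

lemma pv_sw_false (l q : List Char) (hc : ':' ∉ l) :
    PySem.Chars.startswith l (q ++ [':']) = false := by
  rw [Bool.eq_false_iff]
  intro h
  rw [PySem.Chars.startswith_iff] at h
  exact hc (h.subset (by simp))

lemma pv_beq_snoc (a b : List Char) (c : Char) : (a ++ [c] == b ++ [c]) = (a == b) := by
  simp

theorem pv_main (page : String) :
    valid_page_name page = valid_page_name_alt page := by
  by_cases hc : ':' ∈ page.toList
  · have hsep : page.toList.contains ':' = true := by simpa using hc
    simp only [valid_page_name, valid_page_name_alt, pvNonMainspaceA,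
      List.all_cons, List.all_nil, PySem.Str.startswith_eq, hsep]
    rw [show ("File:".toList : List Char) = "File".toList ++ [':'] from by decide,
        show ("File talk:".toList : List Char) = "File talk".toList ++ [':'] from by decide,
        show ("Wikipedia:".toList : List Char) = "Wikipedia".toList ++ [':'] from by decide,
        show ("Wikipedia talk:".toList : List Char) = "Wikipedia talk".toList ++ [':'] from by decide,
        show ("Project:".toList : List Char) = "Project".toList ++ [':'] from by decide,
        show ("Project talk:".toList : List Char) = "Project talk".toList ++ [':'] from by decide,
        show ("Portal:".toList : List Char) = "Portal".toList ++ [':'] from by decide,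
        show ("Portal talk:".toList : List Char) = "Portal talk".toList ++ [':'] from by decide,
        show ("Special:".toList : List Char) = "Special".toList ++ [':'] from by decide,
        show ("Help:".toList : List Char) = "Help".toList ++ [':'] from by decide,
        show ("Help talk:".toList : List Char) = "Help talk".toList ++ [':'] from by decide,
        show ("Template:".toList : List Char) = "Template".toList ++ [':'] from by decide,
        show ("Template talk:".toList : List Char) = "Template talk".toList ++ [':'] from by decide,
        show ("Talk:".toList : List Char) = "Talk".toList ++ [':'] from by decide,
        show ("Category:".toList : List Char) = "Category".toList ++ [':'] from by decide,
        show ("Category talk:".toList : List Char) = "Category talk".toList ++ [':'] from by decide]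
    rw [pv_sw_eq _ _ (by decide) hc, pv_sw_eq _ _ (by decide) hc, pv_sw_eq _ _ (by decide) hc,
        pv_sw_eq _ _ (by decide) hc, pv_sw_eq _ _ (by decide) hc, pv_sw_eq _ _ (by decide) hc,
        pv_sw_eq _ _ (by decide) hc, pv_sw_eq _ _ (by decide) hc, pv_sw_eq _ _ (by decide) hc,
        pv_sw_eq _ _ (by decide) hc, pv_sw_eq _ _ (by decide) hc, pv_sw_eq _ _ (by decide) hc,
        pv_sw_eq _ _ (by decide) hc, pv_sw_eq _ _ (by decide) hc, pv_sw_eq _ _ (by decide) hc,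
        pv_sw_eq _ _ (by decide) hc]
    have hset : pvNonMainspaceB =
        ["File:".toList, "File talk:".toList, "Wikipedia:".toList, "Wikipedia talk:".toList,
         "Project:".toList, "Project talk:".toList, "Portal:".toList, "Portal talk:".toList,
         "Special:".toList, "Help:".toList, "Help talk:".toList, "Template:".toList,
         "Template talk:".toList, "Talk:".toList, "Category:".toList, "Category talk:".toList] := by
      decide
    rw [hset]
    simp only [PySem.Set.contains, List.contains_cons, List.contains_nil]
    rw [show ("File:".toList : List Char) = "File".toList ++ [':'] from by decide,
        show ("File talk:".toList : List Char) = "File talk".toList ++ [':'] from by decide,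
        show ("Wikipedia:".toList : List Char) = "Wikipedia".toList ++ [':'] from by decide,
        show ("Wikipedia talk:".toList : List Char) = "Wikipedia talk".toList ++ [':'] from by decide,
        show ("Project:".toList : List Char) = "Project".toList ++ [':'] from by decide,
        show ("Project talk:".toList : List Char) = "Project talk".toList ++ [':'] from by decide,
        show ("Portal:".toList : List Char) = "Portal".toList ++ [':'] from by decide,
        show ("Portal talk:".toList : List Char) = "Portal talk".toList ++ [':'] from by decide,
        show ("Special:".toList : List Char) = "Special".toList ++ [':'] from by decide,
        show ("Help:".toList : List Char) = "Help".toList ++ [':'] from by decide,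
        show ("Help talk:".toList : List Char) = "Help talk".toList ++ [':'] from by decide,
        show ("Template:".toList : List Char) = "Template".toList ++ [':'] from by decide,
        show ("Template talk:".toList : List Char) = "Template talk".toList ++ [':'] from by decide,
        show ("Talk:".toList : List Char) = "Talk".toList ++ [':'] from by decide,
        show ("Category:".toList : List Char) = "Category".toList ++ [':'] from by decide,
        show ("Category talk:".toList : List Char) = "Category talk".toList ++ [':'] from by decide]
    simp only [pv_beq_snoc, Bool.or_false, Bool.not_or, Bool.not_true, Bool.false_or]
    ac_rfl
  · have hsep : page.toList.contains ':' = false := by simpa using hc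
    simp only [valid_page_name, valid_page_name_alt, pvNonMainspaceA,
      List.all_cons, List.all_nil, PySem.Str.startswith_eq, hsep]
    rw [show ("File:".toList : List Char) = "File".toList ++ [':'] from by decide,
        show ("File talk:".toList : List Char) = "File talk".toList ++ [':'] from by decide,
        show ("Wikipedia:".toList : List Char) = "Wikipedia".toList ++ [':'] from by decide,
        show ("Wikipedia talk:".toList : List Char) = "Wikipedia talk".toList ++ [':'] from by decide,
        show ("Project:".toList : List Char) = "Project".toList ++ [':'] from by decide,
        show ("Project talk:".toList : List Char) = "Project talk".toList ++ [':'] from by decide,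
        show ("Portal:".toList : List Char) = "Portal".toList ++ [':'] from by decide,
        show ("Portal talk:".toList : List Char) = "Portal talk".toList ++ [':'] from by decide,
        show ("Special:".toList : List Char) = "Special".toList ++ [':'] from by decide,
        show ("Help:".toList : List Char) = "Help".toList ++ [':'] from by decide,
        show ("Help talk:".toList : List Char) = "Help talk".toList ++ [':'] from by decide,
        show ("Template:".toList : List Char) = "Template".toList ++ [':'] from by decide,
        show ("Template talk:".toList : List Char) = "Template talk".toList ++ [':'] from by decide,
        show ("Talk:".toList : List Char) = "Talk".toList ++ [':'] from by decide,
        show ("Category:".toList : List Char) = "Category".toList ++ [':'] from by decide,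
        show ("Category talk:".toList : List Char) = "Category talk".toList ++ [':'] from by decide]
    rw [pv_sw_false _ _ hc, pv_sw_false _ _ hc, pv_sw_false _ _ hc, pv_sw_false _ _ hc,
        pv_sw_false _ _ hc, pv_sw_false _ _ hc, pv_sw_false _ _ hc, pv_sw_false _ _ hc,
        pv_sw_false _ _ hc, pv_sw_false _ _ hc, pv_sw_false _ _ hc, pv_sw_false _ _ hc,
        pv_sw_false _ _ hc, pv_sw_false _ _ hc, pv_sw_false _ _ hc, pv_sw_false _ _ hc]
    simp

-- ===== VERDICT (by name: the statement is the Claim_ definition above) =====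
theorem valid_page_name_spec : Claim_equal_valid_page_name := by
  intro page _
  unfold Spec_valid_page_name
  exact pv_main page
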